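-- pv_equiv track=rewrite | github.com/OctaveCesaire/op-rationnelle | functionBalasHammer.py | retirer_Ligne_Colonne
-- ===== SOURCE A (Python) =====
-- def retirer_Ligne_Colonne(tableau):
--     tabl = []
--     penality = 0
--     for i in tableau:
--         if i != -1:
--             tabl.append(i)
--     tabl.pop(-1)
--     if len(tabl) > 1:
--         for nbr in range(2):
--             penality = abs(penality - min(tabl))
--             tabl.pop(tabl.index(min(tabl)))
--     elif len(tabl) == 0:
--         penality = -1 # Fin des calcul de pénalité
--     else :
--         penality = tabl[0]
--     return penality
-- ===== SOURCE B (Python) =====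
-- def retirer_Ligne_Colonne(tableau):
--     tabl = [x for x in tableau if x != -1]
--     tabl.pop(-1)
--     if not tabl:
--         return -1
--     if len(tabl) == 1:
--         return tabl[0]
--     s = sorted(tabl)
--     return abs(abs(s[0]) - s[1])
-- ===== Notes on version B (the rewrite author's own statement) =====
-- stated objective: simpler
-- what changed: B filters once, pops the last element (keeping the IndexError when nothing survives the filter), and for more than one remaining value sorts the list once and takes the two smallest entries, replacing A's two rounds of min/index/pop scanning.
-- outside the precondition, e.g. on retirer_Ligne_Colonne([-1, -1]): A raises IndexError, B raises IndexError
import Mathlib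
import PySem

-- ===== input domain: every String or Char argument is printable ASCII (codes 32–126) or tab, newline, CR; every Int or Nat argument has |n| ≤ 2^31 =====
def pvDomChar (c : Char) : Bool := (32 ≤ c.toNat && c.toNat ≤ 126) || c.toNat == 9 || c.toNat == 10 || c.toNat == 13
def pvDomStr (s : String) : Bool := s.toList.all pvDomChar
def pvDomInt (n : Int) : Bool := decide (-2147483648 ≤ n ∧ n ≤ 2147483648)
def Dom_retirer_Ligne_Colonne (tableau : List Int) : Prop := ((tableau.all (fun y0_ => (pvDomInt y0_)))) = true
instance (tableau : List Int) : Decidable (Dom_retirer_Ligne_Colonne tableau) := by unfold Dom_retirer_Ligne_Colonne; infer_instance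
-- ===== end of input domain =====

-- B replaces A's two rounds of min/index/pop with one sort of the filtered list picking the
-- two smallest values (objective: simpler). Neither version mutates the argument.

-- ===== PORT A =====
def retirer_Ligne_Colonne (tableau : List Int) : Int :=
  let tabl : List Int := tableau.foldl (fun acc i => if i ≠ -1 then acc ++ [i] else acc) []
  match PySem.List.pop? tabl with
  | none => 0   -- tabl.pop(-1) raises IndexError on empty: excluded by Pre_
  | some (_, tabl) =>
    if tabl.length > 1 then
      ((List.range 2).foldl (fun (st : Int × List Int) _ =>
        match PySem.List.min? st.2 (fun x => x) with
        | none => st   -- unreachable: the list has ≥ 2 then ≥ 1 elements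
        | some m => (|st.1 - m|, (PySem.List.remove? st.2 m).getD st.2)) ((0 : Int), tabl)).1
    else if tabl.length = 0 then -1
    else (PySem.List.pyGet? tabl 0).getD 0

-- ===== PORT B =====
def retirer_Ligne_Colonne_alt (tableau : List Int) : Int :=
  let tabl : List Int := tableau.filter (fun x => x ≠ -1)
  match PySem.List.pop? tabl with
  | none => 0   -- tabl.pop(-1) raises IndexError on empty: excluded by Pre_
  | some (_, tabl) =>
    if tabl.length = 0 then -1
    else if tabl.length = 1 then (PySem.List.pyGet? tabl 0).getD 0
    else
      let s := PySem.List.sorted tabl (fun x => x) false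
      |(|(PySem.List.pyGet? s 0).getD 0|) - (PySem.List.pyGet? s 1).getD 0|

-- ===== PRECONDITION & SPEC =====
-- Pre_ excludes exactly the inputs where A raises IndexError: tableau with no element ≠ -1
-- (the filtered list is empty, so tabl.pop(-1) raises in both A and B).
def Pre_retirer_Ligne_Colonne (tableau : List Int) : Prop :=
  tableau.filter (fun x => x ≠ -1) ≠ []
instance (tableau : List Int) : Decidable (Pre_retirer_Ligne_Colonne tableau) := by
  unfold Pre_retirer_Ligne_Colonne; infer_instance
def pvWitness_retirer_Ligne_Colonne : List Int := [4, 7, -1, 2]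

def Spec_retirer_Ligne_Colonne (tableau : List Int) (out : Int) : Prop := out = retirer_Ligne_Colonne_alt tableau
instance (tableau : List Int) (out : Int) : Decidable (Spec_retirer_Ligne_Colonne tableau out) := by unfold Spec_retirer_Ligne_Colonne; infer_instance

-- ===== CLAIM (what is proved, stated in full; the proofs are below) =====
def Claim_equal_retirer_Ligne_Colonne : Prop := ∀ (tableau : List Int), Dom_retirer_Ligne_Colonne tableau → Pre_retirer_Ligne_Colonne tableau → Spec_retirer_Ligne_Colonne tableau (retirer_Ligne_Colonne tableau)

-- ===== LEMMAS AND PROOFS =====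

-- A's append-loop builds exactly the filtered list.
theorem pv_filter_loop (tableau : List Int) :
    tableau.foldl (fun acc i => if i ≠ -1 then acc ++ [i] else acc) [] =
      tableau.filter (fun x => x ≠ -1) := by
  simpa using PySem.List.foldl_append_if (fun x => decide (x ≠ -1)) (fun x => x) tableau []

-- min? picks the head value of the sorted list.
theorem pv_min_eq_head (l : List Int) (a : Int) (t : List Int)
    (hs : PySem.List.sorted l (fun x => x) false = a :: t) :
    PySem.List.min? l (fun x => x) = some a := by
  have hl : l ≠ [] := by
    intro h
    rw [(PySem.List.sorted_eq_nil_iff l (fun x => x) false).mpr h] at hs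
    exact (List.cons_ne_nil a t) hs.symm
  obtain ⟨m, hm⟩ : ∃ m, PySem.List.min? l (fun x => x) = some m := by
    cases h : PySem.List.min? l (fun x => x) with
    | none => exact absurd ((PySem.List.min?_eq_none_iff l (fun x => x)).mp h) hl
    | some m => exact ⟨m, rfl⟩
  have hmem : m ∈ l := PySem.List.min?_mem hm
  have hmin := PySem.List.min?_isMin hm
  have hamem : a ∈ l := by
    have : a ∈ PySem.List.sorted l (fun x => x) false := by rw [hs]; simp
    exact (PySem.List.mem_sorted l (fun x => x) false a).mp this
  have hle := PySem.List.key_head_sorted_le l (fun x => x) hs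
  rw [hm]
  exact congrArg some (le_antisymm (hmin a hamem) (hle m hmem))

-- A's two-round min/remove loop on a list of length ≥ 2 yields ||a| - b| for the two
-- smallest values a, b (the first two entries of the sorted list).
theorem pv_core (l : List Int) (a b : Int) (r : List Int)
    (hs : PySem.List.sorted l (fun x => x) false = a :: b :: r) :
    ((List.range 2).foldl (fun (st : Int × List Int) _ =>
        match PySem.List.min? st.2 (fun x => x) with
        | none => st
        | some m => (|st.1 - m|, (PySem.List.remove? st.2 m).getD st.2)) ((0 : Int), l)).1
      = |(|a|) - b| := by
  have h1 := pv_min_eq_head l a (b :: r) hs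
  have hamem : a ∈ l := PySem.List.min?_mem h1
  have hrem : PySem.List.remove? l a = some (l.erase a) :=
    PySem.List.remove?_eq_some_erase l a hamem
  have hperm : (l.erase a).Perm (b :: r) := by
    have hp : l.Perm (PySem.List.sorted l (fun x => x) false) :=
      (PySem.List.sorted_perm (xs := l) (key := fun x => x) (rev := false)).symm
    have he := hp.erase a
    rw [hs, List.erase_cons_head] at he
    exact he
  have hpair : (b :: r).Pairwise (fun p q : Int => p ≤ q) := by
    have hp := PySem.List.sorted_pairwise (xs := l) (key := fun x => x)
    rw [hs] at hp
    exact hp.of_cons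
  have hsorted2 : PySem.List.sorted (l.erase a) (fun x => x) false = b :: r := by
    rw [PySem.List.sorted_eq_sorted_of_perm (l.erase a) (b :: r) (fun x => x)
      (fun _ _ h => h) hperm]
    exact PySem.List.sorted_eq_self_of_pairwise (b :: r) (fun x => x) hpair
  have h2 := pv_min_eq_head (l.erase a) b r hsorted2
  have hr2 : List.range 2 = [0, 1] := rfl
  rw [hr2]
  simp only [List.foldl_cons, List.foldl_nil, h1, hrem, h2, Option.getD_some]
  simp [abs_sub_comm]

-- ===== VERDICT (by name: the statement is the Claim_ definition above) =====
theorem retirer_Ligne_Colonne_spec : Claim_equal_retirer_Ligne_Colonne := by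
  intro tableau _ hpre
  unfold Pre_retirer_Ligne_Colonne at hpre
  unfold Spec_retirer_Ligne_Colonne retirer_Ligne_Colonne retirer_Ligne_Colonne_alt
  rw [pv_filter_loop]
  have hsplit : tableau.filter (fun x => x ≠ -1) =
      (tableau.filter (fun x => x ≠ -1)).dropLast ++
        [(tableau.filter (fun x => x ≠ -1)).getLast hpre] :=
    (List.dropLast_append_getLast hpre).symm
  rw [hsplit]
  simp only [PySem.List.pop?_last]
  generalize (tableau.filter (fun x => x ≠ -1)).dropLast = l
  match l with
  | [] => simp
  | [x] => simp [PySem.List.pyGet?, PySem.List.pyIdx?]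
  | x :: y :: rest =>
    have hlen : (PySem.List.sorted (x :: y :: rest) (fun v => v) false).length =
        rest.length + 2 := by
      simp [PySem.List.length_sorted]
    obtain ⟨a, b, r, hs⟩ : ∃ a b r,
        PySem.List.sorted (x :: y :: rest) (fun v => v) false = a :: b :: r := by
      match h : PySem.List.sorted (x :: y :: rest) (fun v => v) false with
      | [] => rw [h] at hlen; simp at hlen
      | [u] => rw [h] at hlen; simp at hlen
      | u :: v :: w => exact ⟨u, v, w, rfl⟩
    rw [pv_core (x :: y :: rest) a b r hs]
    have hnn : (0 : Int) ≤ (r.length : Int) + 1 := by positivity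
    simp [hs, PySem.List.pyGet?, PySem.List.pyIdx?, hnn]
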